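-- pv_equiv track=rewrite | github.com/sona139/Python | PY01041.py | deff
-- ===== SOURCE A (Python) =====
-- def deff(str):
--     if len(str) < 3:
--         return 'NO'
--     i = 1
--     while i < len(str) and str[i] > str[i-1]:
--         i += 1
--     while i < len(str) and str[i] < str[i-1]:
--         i += 1
--     return 'YES' if i == len(str) else 'NO'
-- ===== SOURCE B (Python) =====
-- def deff(str):
--     if len(str) < 3:
--         return 'NO'
--     d = [(str[i] > str[i - 1]) - (str[i] < str[i - 1]) for i in range(1, len(str))]
--     if 0 in d:
--         return 'NO'
--     return 'YES' if all(y <= x for x, y in zip(d, d[1:])) else 'NO'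
-- ===== Notes on version B (the rewrite author's own statement) =====
-- stated objective: alternative
-- what changed: Replaces A's stateful two-phase while-loop scan with building the list of adjacent comparison signs once and checking two global properties of it (no zero sign, signs non-increasing).
import Mathlib
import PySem

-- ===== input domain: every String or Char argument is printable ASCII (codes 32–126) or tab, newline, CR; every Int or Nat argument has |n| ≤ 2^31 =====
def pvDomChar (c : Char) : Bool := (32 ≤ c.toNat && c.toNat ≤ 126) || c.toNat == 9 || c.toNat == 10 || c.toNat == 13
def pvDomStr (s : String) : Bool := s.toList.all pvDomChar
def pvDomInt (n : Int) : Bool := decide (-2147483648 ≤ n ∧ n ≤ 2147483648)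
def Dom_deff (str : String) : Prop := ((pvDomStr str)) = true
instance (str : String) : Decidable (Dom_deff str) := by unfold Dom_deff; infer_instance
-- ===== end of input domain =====

-- B replaces A's stateful two-phase while-loop scan by building the adjacent-comparison
-- sign list once and checking two global properties of it (alternative decomposition,
-- same cost); return values agree on all inputs.

-- ===== PORT A =====
-- `while i < len(str) and str[i] > str[i-1]: i += 1`   (indices 1 ≤ i are always in range when the guard holds)
def deffLoop1 (s : List Char) (i : Nat) : Nat :=
  if _h : i < s.length then
    if s[i-1]! < s[i]! then deffLoop1 s (i+1) else i
  else i
termination_by s.length - i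

-- `while i < len(str) and str[i] < str[i-1]: i += 1`
def deffLoop2 (s : List Char) (i : Nat) : Nat :=
  if _h : i < s.length then
    if s[i]! < s[i-1]! then deffLoop2 s (i+1) else i
  else i
termination_by s.length - i

def deff (str : String) : String :=
  let s := str.toList
  if s.length < 3 then "NO"
  else if deffLoop2 s (deffLoop1 s 1) = s.length then "YES" else "NO"

-- ===== PORT B =====
-- `(str[i] > str[i-1]) - (str[i] < str[i-1])` : bools coerced to ints, then subtracted
def deffSgn (a b : Char) : Int := (if a < b then (1:Int) else 0) - (if b < a then (1:Int) else 0)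

def deff_alt (str : String) : String :=
  let s := str.toList
  if s.length < 3 then "NO"
  else
    let d := (List.range' 1 (s.length - 1)).map (fun i => deffSgn s[i-1]! s[i]!)
    if (0:Int) ∈ d then "NO"
    else if (d.zip d.tail).all (fun p => p.2 ≤ p.1) then "YES" else "NO"

-- ===== PRECONDITION & SPEC =====
def Spec_deff (str : String) (out : String) : Prop := out = deff_alt str
instance (str : String) (out : String) : Decidable (Spec_deff str out) := by unfold Spec_deff; infer_instance

-- ===== CLAIM (what is proved, stated in full; the proofs are below) =====
def Claim_equal_deff : Prop := ∀ (str : String), Dom_deff str → Spec_deff str (deff str)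

-- ===== LEMMAS AND PROOFS =====

-- proof-only helpers: A's two loops, re-read structurally on the char-list suffix
def okDown : List Char → Bool
  | a :: b :: r => if b < a then okDown (b :: r) else false
  | _ => true

def okUp : List Char → Bool
  | a :: b :: r => if a < b then okUp (b :: r) else okDown (a :: b :: r)
  | _ => true

-- the sign list, computed structurally
def pairSigns : List Char → List Int
  | a :: b :: r => deffSgn a b :: pairSigns (b :: r)
  | _ => []

-- `all(y <= x for x, y in zip(d, d[1:]))`, structurally
def zipAllGe : List Int → Bool
  | x :: y :: r => if y ≤ x then zipAllGe (y :: r) else false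
  | _ => true

theorem zipAllGe_eq (d : List Int) :
    (d.zip d.tail).all (fun p => p.2 ≤ p.1) = zipAllGe d := by
  match d with
  | [] => rfl
  | [x] => rfl
  | x :: y :: r =>
    have ih := zipAllGe_eq (y :: r)
    simp only [List.tail_cons, List.zip_cons_cons, List.all_cons, zipAllGe] at *
    by_cases h : y ≤ x <;> simp [h, ih]

theorem pairSigns_getElem (s : List Char) (k : Nat) (hk : k < (pairSigns s).length) :
    (pairSigns s)[k] = deffSgn s[k]! s[k+1]! := by
  match s, k with
  | a :: b :: r, 0 => rfl
  | a :: b :: r, k + 1 =>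
    have ih := pairSigns_getElem (b :: r) k (by simpa [pairSigns] using hk)
    simpa [pairSigns, List.getElem!_cons_succ] using ih

theorem pairSigns_length (s : List Char) : (pairSigns s).length = s.length - 1 := by
  match s with
  | [] => rfl
  | [a] => rfl
  | a :: b :: r => simpa [pairSigns] using pairSigns_length (b :: r)

theorem getBang (s : List Char) (i : Nat) (h : i < s.length) : s[i]! = s[i] := by
  rw [List.getElem!_eq_getElem?_getD, List.getElem?_eq_getElem h]
  rfl

theorem pairSigns_eq (s : List Char) :
    (List.range' 1 (s.length - 1)).map (fun i => deffSgn s[i-1]! s[i]!) = pairSigns s := by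
  apply List.ext_getElem
  · simp [pairSigns_length]
  · intro k h1 h2
    simp only [List.getElem_map, List.getElem_range']
    have e1 : 1 + 1 * k - 1 = k := by omega
    have e2 : 1 + 1 * k = k + 1 := by omega
    rw [e1, e2, pairSigns_getElem]

theorem sgn_cases (a b : Char) : deffSgn a b = -1 ∨ deffSgn a b = 0 ∨ deffSgn a b = 1 := by
  unfold deffSgn
  split_ifs <;> simp

theorem sgn_mem_bounds {s : List Char} {x : Int} (hx : x ∈ pairSigns s) :
    x = -1 ∨ x = 0 ∨ x = 1 := by
  match s with
  | [] => simp [pairSigns] at hx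
  | [a] => simp [pairSigns] at hx
  | a :: b :: r =>
    rcases (by simpa [pairSigns] using hx : x = deffSgn a b ∨ x ∈ pairSigns (b :: r)) with h | h
    · simpa [h] using sgn_cases a b
    · exact sgn_mem_bounds h

theorem drop_pred (s : List Char) (i : Nat) (h1 : 1 ≤ i) (h : i ≤ s.length) :
    s.drop (i-1) = s[i-1]! :: s.drop i := by
  have hi1 : i - 1 < s.length := by omega
  rw [List.drop_eq_getElem_cons hi1, getBang _ _ hi1]
  have : i - 1 + 1 = i := by omega
  rw [this]

-- A's loop2 reaches the end iff okDown holds on the suffix starting at i-1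
theorem loop2_eq (s : List Char) (i : Nat) (h1 : 1 ≤ i) (h2 : i ≤ s.length) :
    (deffLoop2 s i = s.length) ↔ okDown (s.drop (i-1)) = true := by
  rw [deffLoop2, drop_pred s i h1 h2]
  by_cases h : i < s.length
  · have hdi : s.drop i = s[i]! :: s.drop (i+1) := by
      rw [List.drop_eq_getElem_cons h, getBang _ _ h]
    rw [dif_pos h, hdi]
    by_cases hc : s[i]! < s[i-1]!
    · have ih := loop2_eq s (i+1) (by omega) (by omega)
      rw [show i + 1 - 1 = i from rfl, hdi] at ih
      rw [if_pos hc]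
      simp only [okDown, if_pos hc]
      exact ih
    · rw [if_neg hc]
      simp only [okDown, if_neg hc]
      simp
      omega
  · have hi : i = s.length := by omega
    subst hi
    rw [dif_neg h, List.drop_length]
    simp [okDown]
termination_by s.length - i

theorem loop1_eq (s : List Char) (i : Nat) (h1 : 1 ≤ i) (h2 : i ≤ s.length) :
    (deffLoop2 s (deffLoop1 s i) = s.length) ↔ okUp (s.drop (i-1)) = true := by
  rw [deffLoop1, drop_pred s i h1 h2]
  by_cases h : i < s.length
  · have hdi : s.drop i = s[i]! :: s.drop (i+1) := by
      rw [List.drop_eq_getElem_cons h, getBang _ _ h]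
    rw [dif_pos h, hdi]
    by_cases hc : s[i-1]! < s[i]!
    · have ih := loop1_eq s (i+1) (by omega) (by omega)
      rw [show i + 1 - 1 = i from rfl, hdi] at ih
      rw [if_pos hc]
      simp only [okUp, if_pos hc]
      exact ih
    · have h2' := loop2_eq s i h1 h2
      rw [drop_pred s i h1 h2, hdi] at h2'
      rw [if_neg hc]
      simp only [okUp, if_neg hc]
      exact h2'
  · have hi : i = s.length := by omega
    subst hi
    rw [dif_neg h, List.drop_length, deffLoop2, dif_neg h]
    simp [okUp]
termination_by s.length - i

theorem okDown_iff (s : List Char) :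
    okDown s = true ↔ ∀ x ∈ pairSigns s, x = -1 := by
  match s with
  | [] => simp [okDown, pairSigns]
  | [a] => simp [okDown, pairSigns]
  | a :: b :: r =>
    have ih := okDown_iff (b :: r)
    by_cases hba : b < a
    · have hs : deffSgn a b = -1 := by
        unfold deffSgn
        have : ¬ a < b := by exact fun h => absurd hba (lt_asymm h)
        simp [this, hba]
      simp [okDown, hba, pairSigns, hs, ih]
    · have hs : deffSgn a b ≠ -1 := by
        unfold deffSgn
        by_cases hab : a < b <;> simp [hab, hba]
      simp only [okDown, if_neg hba, pairSigns]
      constructor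
      · intro h; exact absurd h (by simp)
      · intro h; exact absurd (h _ (by simp)) hs

theorem zipAllGe_one_cons (p : List Int) (hb : ∀ x ∈ p, x ≤ 1) :
    zipAllGe ((1:Int) :: p) = zipAllGe p := by
  match p with
  | [] => rfl
  | y :: q => simp [zipAllGe, hb y (by simp)]

theorem neg_one_run (p : List Int) (hb : ∀ x ∈ p, x = -1 ∨ x = 0 ∨ x = 1) :
    (∀ x ∈ p, x = -1) ↔ ((0:Int) ∉ p ∧ zipAllGe ((-1) :: p) = true) := by
  match p with
  | [] => simp [zipAllGe]
  | y :: q =>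
    have ih := neg_one_run q (fun x hx => hb x (by simp [hx]))
    rcases hb y (by simp) with hy | hy | hy
    · subst hy
      simp only [List.mem_cons, zipAllGe]
      constructor
      · intro h
        have := ih.mp (fun x hx => h x (Or.inr hx))
        simp [this.1, this.2, zipAllGe]
      · intro ⟨h0, hz⟩
        rw [if_pos (by norm_num)] at hz
        intro x hx
        rcases hx with h | h
        · exact h
        · exact (ih.mpr ⟨fun hc => h0 (Or.inr hc), hz⟩) x h
    · subst hy; simp [zipAllGe]
    · subst hy
      constructor
      · intro h; exact absurd (h 1 (by simp)) (by norm_num)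
      · intro ⟨_, hz⟩
        exact absurd hz (by simp [zipAllGe])

theorem okUp_iff (s : List Char) :
    okUp s = true ↔ ((0:Int) ∉ pairSigns s ∧ zipAllGe (pairSigns s) = true) := by
  match s with
  | [] => simp [okUp, pairSigns, zipAllGe]
  | [a] => simp [okUp, pairSigns, zipAllGe]
  | a :: b :: r =>
    have hbnd := fun x hx => @sgn_mem_bounds (b :: r) x hx
    by_cases hab : a < b
    · have hs : deffSgn a b = 1 := by
        unfold deffSgn
        have : ¬ b < a := fun h => absurd hab (lt_asymm h)
        simp [hab, this]
      have ih := okUp_iff (b :: r)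
      have hz := zipAllGe_one_cons (pairSigns (b :: r))
        (fun x hx => by rcases hbnd x hx with h | h | h <;> omega)
      simp [okUp, hab, pairSigns, hs, ih, hz]
    · have hdown : okUp (a :: b :: r) = okDown (a :: b :: r) := by
        simp [okUp, hab]
      by_cases hba : b < a
      · have hs : deffSgn a b = -1 := by
          unfold deffSgn; simp [hab, hba]
        rw [hdown, okDown_iff]
        have hrun := neg_one_run (pairSigns (b :: r)) hbnd
        simp only [pairSigns, hs, List.mem_cons]
        constructor
        · intro h
          have := hrun.mp (fun x hx => h x (Or.inr hx))
          exact ⟨by push_neg; exact ⟨by norm_num, fun hc => this.1 hc⟩, this.2⟩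
        · intro ⟨h0, hz⟩
          intro x hx
          rcases hx with h | h
          · simp [h]
          · exact (hrun.mpr ⟨fun hc => h0 (Or.inr hc), hz⟩) x h
      · have hs : deffSgn a b = 0 := by
          unfold deffSgn; simp [hab, hba]
        rw [hdown]
        simp [okDown, hba, pairSigns, hs]

-- ===== VERDICT (by name: the statement is the Claim_ definition above) =====
theorem deff_spec : Claim_equal_deff := by
  intro str _
  unfold Spec_deff deff deff_alt
  simp only []
  by_cases hlen : str.toList.length < 3
  · rw [if_pos hlen, if_pos hlen]
  · have hA := loop1_eq str.toList 1 (by omega) (by omega)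
    simp only [Nat.sub_self, List.drop_zero] at hA
    rw [okUp_iff] at hA
    rw [← pairSigns_eq str.toList, ← zipAllGe_eq] at hA
    rw [if_neg hlen, if_neg hlen]
    by_cases hm : (0:Int) ∈ (List.range' 1 (str.toList.length - 1)).map
        (fun i => deffSgn str.toList[i-1]! str.toList[i]!)
    · rw [if_pos hm, if_neg (by rw [hA]; exact fun h => h.1 hm)]
    · rw [if_neg hm]
      by_cases hz : ((((List.range' 1 (str.toList.length - 1)).map
          (fun i => deffSgn str.toList[i-1]! str.toList[i]!)).zip
          (((List.range' 1 (str.toList.length - 1)).map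
          (fun i => deffSgn str.toList[i-1]! str.toList[i]!)).tail)).all (fun p => p.2 ≤ p.1)) = true
      · rw [if_pos hz, if_pos (by rw [hA]; exact ⟨hm, hz⟩)]
      · rw [if_neg hz, if_neg (by rw [hA]; exact fun h => hz h.2)]
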